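-- pv_equiv track=rewrite | github.com/fclopezjurado/python-course | lesson4/tennis_score.py | is_there_a_match_winner
-- ===== SOURCE A (Python) =====
-- MIN_DIFF_TO_WIN_SET_OR_MATCH = 2
--
-- MIN_NUMBER_OF_GAMES_TO_WIN_SET = 6
--
-- INITIAL_SCORE = 0
--
-- FIRST_PLAYER = 0
--
-- SECOND_PLAYER = 1
--
-- def is_there_a_match_winner(score_in_match):
--     first_player_score = INITIAL_SCORE
--     second_player_score = INITIAL_SCORE
--
--     for score_in_set in score_in_match:
--         if not is_there_a_set_winner(score_in_set):
--             continue
--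
--         if FIRST_PLAYER == get_winner(score_in_set):
--             first_player_score += 1
--         else:
--             second_player_score += 1
--
--         if first_player_score == MIN_DIFF_TO_WIN_SET_OR_MATCH or second_player_score == MIN_DIFF_TO_WIN_SET_OR_MATCH:
--             return True
--
--     return False
--
-- def is_there_a_set_winner(score_in_set):
--     first_player_score, second_player_score = score_in_set
--
--     if (first_player_score >= MIN_NUMBER_OF_GAMES_TO_WIN_SET
--             and second_player_score <= first_player_score - MIN_DIFF_TO_WIN_SET_OR_MATCH):
--         return True
--
--     if (second_player_score >= MIN_NUMBER_OF_GAMES_TO_WIN_SET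
--             and first_player_score <= second_player_score - MIN_DIFF_TO_WIN_SET_OR_MATCH):
--         return True
--
--     return False
--
-- def get_winner(score):
--     if score[FIRST_PLAYER] > score[SECOND_PLAYER]:
--         return FIRST_PLAYER
--
--     return SECOND_PLAYER
-- ===== SOURCE B (Python) =====
-- MIN_DIFF_TO_WIN_SET_OR_MATCH = 2
--
-- MIN_NUMBER_OF_GAMES_TO_WIN_SET = 6
--
-- FIRST_PLAYER = 0
--
-- SECOND_PLAYER = 1
--
--
-- def is_there_a_set_winner(score_in_set):
--     first, second = score_in_set
--     return ((first >= MIN_NUMBER_OF_GAMES_TO_WIN_SET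
--              and second <= first - MIN_DIFF_TO_WIN_SET_OR_MATCH)
--             or (second >= MIN_NUMBER_OF_GAMES_TO_WIN_SET
--                 and first <= second - MIN_DIFF_TO_WIN_SET_OR_MATCH))
--
--
-- def get_winner(score):
--     return FIRST_PLAYER if score[0] > score[1] else SECOND_PLAYER
--
--
-- def is_there_a_match_winner(score_in_match):
--     # A match winner exists iff two decided sets share the same winner:
--     # search for such a pair directly (no counting accumulators).
--     for i, earlier_set in enumerate(score_in_match):
--         if not is_there_a_set_winner(earlier_set):
--             continue
--         for later_set in score_in_match[i + 1:]:
--             if (is_there_a_set_winner(later_set)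
--                     and get_winner(later_set) == get_winner(earlier_set)):
--                 return True
--     return False
-- ===== Notes on version B (the rewrite author's own statement) =====
-- stated objective: alternative
-- what changed: Replaces A's incremental per-player win counters with early exit by a nested pairwise search for two decided sets sharing the same winner (correct because the threshold is exactly 2, so a winner exists iff such a pair exists).
import Mathlib
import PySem

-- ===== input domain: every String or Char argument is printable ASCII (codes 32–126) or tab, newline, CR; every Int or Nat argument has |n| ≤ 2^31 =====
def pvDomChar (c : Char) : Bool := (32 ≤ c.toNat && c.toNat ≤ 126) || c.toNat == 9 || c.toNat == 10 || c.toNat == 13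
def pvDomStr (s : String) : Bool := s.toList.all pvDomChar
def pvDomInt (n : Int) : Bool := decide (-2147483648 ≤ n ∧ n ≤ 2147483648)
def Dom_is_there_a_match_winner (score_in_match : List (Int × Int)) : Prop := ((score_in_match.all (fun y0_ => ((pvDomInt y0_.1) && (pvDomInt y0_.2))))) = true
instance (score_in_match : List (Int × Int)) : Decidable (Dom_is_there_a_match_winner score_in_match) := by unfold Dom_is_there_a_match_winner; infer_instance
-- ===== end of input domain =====

-- B replaces A's incremental win counters with early exit by a nested pairwise
-- search for two decided sets with the same winner; objective: alternative.


-- ===== PORT A =====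
def is_there_a_set_winner_A (score_in_set : Int × Int) : Bool :=
  if score_in_set.1 ≥ 6 ∧ score_in_set.2 ≤ score_in_set.1 - 2 then true
  else if score_in_set.2 ≥ 6 ∧ score_in_set.1 ≤ score_in_set.2 - 2 then true
  else false

def get_winner_A (score : Int × Int) : Int :=
  if score.1 > score.2 then 0 else 1

-- A's for-loop with the two accumulators and the early `return True`
def loop_A : List (Int × Int) → Int → Int → Bool
  | [], _, _ => false
  | score_in_set :: rest, first_player_score, second_player_score =>
    if ¬ is_there_a_set_winner_A score_in_set then
      loop_A rest first_player_score second_player_score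
    else
      let first_player_score' :=
        if (0 : Int) = get_winner_A score_in_set then first_player_score + 1 else first_player_score
      let second_player_score' :=
        if (0 : Int) = get_winner_A score_in_set then second_player_score else second_player_score + 1
      if first_player_score' = 2 ∨ second_player_score' = 2 then true
      else loop_A rest first_player_score' second_player_score'

def is_there_a_match_winner (score_in_match : List (Int × Int)) : Bool :=
  loop_A score_in_match 0 0

-- ===== PORT B =====
def is_there_a_set_winner_B (score_in_set : Int × Int) : Bool :=
  (decide (score_in_set.1 ≥ 6) && decide (score_in_set.2 ≤ score_in_set.1 - 2)) ||
  (decide (score_in_set.2 ≥ 6) && decide (score_in_set.1 ≤ score_in_set.2 - 2))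

def get_winner_B (score : Int × Int) : Int :=
  if score.1 > score.2 then 0 else 1

-- Source B's outer loop over (earlier_set, remaining slice); the inner for-loop with
-- its early `return True` is the `any` over the remaining suffix.
def pair_search_B : List (Int × Int) → Bool
  | [] => false
  | earlier_set :: rest =>
    if ¬ is_there_a_set_winner_B earlier_set then
      pair_search_B rest
    else if rest.any (fun later_set =>
        is_there_a_set_winner_B later_set &&
        decide (get_winner_B later_set = get_winner_B earlier_set)) then
      true
    else
      pair_search_B rest

def is_there_a_match_winner_alt (score_in_match : List (Int × Int)) : Bool :=
  pair_search_B score_in_match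

-- ===== PRECONDITION & SPEC =====
def Spec_is_there_a_match_winner (score_in_match : List (Int × Int)) (out : Bool) : Prop := out = is_there_a_match_winner_alt score_in_match
instance (score_in_match : List (Int × Int)) (out : Bool) : Decidable (Spec_is_there_a_match_winner score_in_match out) := by unfold Spec_is_there_a_match_winner; infer_instance

-- ===== CLAIM (what is proved, stated in full; the proofs are below) =====
def Claim_equal_is_there_a_match_winner : Prop := ∀ (score_in_match : List (Int × Int)), Dom_is_there_a_match_winner score_in_match → Spec_is_there_a_match_winner score_in_match (is_there_a_match_winner score_in_match)

-- ===== LEMMAS AND PROOFS =====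

-- winners of the decided sets of l
def winners_of (l : List (Int × Int)) : List Int :=
  (l.filter is_there_a_set_winner_B).map get_winner_B

theorem set_winner_AB (s : Int × Int) : is_there_a_set_winner_A s = is_there_a_set_winner_B s := by
  unfold is_there_a_set_winner_A is_there_a_set_winner_B
  split_ifs with h1 h2 <;> simp_all

-- Loop invariant: with both accumulators below 2, A's loop returns true exactly
-- when an accumulator plus that player's remaining set-win count reaches 2.
theorem loop_A_eq (l : List (Int × Int)) : ∀ (a b : Nat), a < 2 → b < 2 →
    loop_A l (a : Int) (b : Int) =
      (decide (2 ≤ a + (winners_of l).count 0) ||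
       decide (2 ≤ b + (winners_of l).count 1)) := by
  induction l with
  | nil => intro a b ha hb; simp [loop_A, winners_of]; omega
  | cons s rest ih =>
    intro a b ha hb
    by_cases hw : is_there_a_set_winner_A s
    · simp only [loop_A]
      rw [if_neg (by simp [hw])]
      unfold winners_of
      rw [List.filter_cons_of_pos (by rw [← set_winner_AB]; exact hw)]
      by_cases hfst : s.1 > s.2
      · have hg : get_winner_A s = 0 := by simp [get_winner_A, hfst]
        have hgB : get_winner_B s = 0 := by simp [get_winner_B, hfst]
        simp only [hg, List.map_cons, hgB, List.count_cons]
        by_cases h2 : (a : Int) + 1 = 2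
        · have : a = 1 := by omega
          subst this
          rw [if_pos (by norm_num)]
          symm; rw [Bool.or_eq_true]; left; rw [decide_eq_true_iff]; simp; omega
        · have ha1 : a + 1 < 2 := by omega
          rw [if_neg (by simp; omega)]
          have := ih (a + 1) b ha1 hb
          unfold winners_of at this
          push_cast at this ⊢
          rw [this]; congr 1 <;> · rw [decide_eq_decide]; simp; omega
      · have hg : get_winner_A s = 1 := by simp [get_winner_A, hfst]
        have hgB : get_winner_B s = 1 := by simp [get_winner_B, hfst]
        simp only [hg, List.map_cons, hgB, List.count_cons]
        by_cases h2 : (b : Int) + 1 = 2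
        · have : b = 1 := by omega
          subst this
          rw [if_pos (by norm_num)]
          symm; rw [Bool.or_eq_true]; right; rw [decide_eq_true_iff]; simp; omega
        · have hb1 : b + 1 < 2 := by omega
          rw [if_neg (by simp; omega)]
          have := ih a (b + 1) ha hb1
          unfold winners_of at this
          push_cast at this ⊢
          rw [this]; congr 1 <;> · rw [decide_eq_decide]; simp; omega
    · simp only [loop_A]
      rw [if_pos (by simp [hw])]
      unfold winners_of
      rw [List.filter_cons_of_neg (by rw [← set_winner_AB]; exact hw)]
      exact ih a b ha hb

-- the inner `any` of B finds a decided set with winner x iff x occurs among the winners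
theorem any_eq_count (rest : List (Int × Int)) (x : Int) :
    rest.any (fun t => is_there_a_set_winner_B t && decide (get_winner_B t = x)) =
      decide (1 ≤ (winners_of rest).count x) := by
  unfold winners_of
  rw [Bool.eq_iff_iff, List.any_eq_true, decide_eq_true_iff]
  constructor
  · rintro ⟨t, ht, hp⟩
    simp only [Bool.and_eq_true, decide_eq_true_iff] at hp
    have : x ∈ (rest.filter is_there_a_set_winner_B).map get_winner_B := by
      simp only [List.mem_map, List.mem_filter]
      exact ⟨t, ⟨ht, hp.1⟩, hp.2⟩
    rwa [← List.count_pos_iff] at this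
  · intro h
    have hx : x ∈ (rest.filter is_there_a_set_winner_B).map get_winner_B := by
      rw [← List.count_pos_iff]; omega
    simp only [List.mem_map, List.mem_filter] at hx
    obtain ⟨t, ⟨ht, hv⟩, hw⟩ := hx
    exact ⟨t, ht, by simp [hv, hw]⟩

-- B's pairwise search succeeds iff some winner occurs at least twice
theorem pair_search_eq (l : List (Int × Int)) :
    pair_search_B l =
      (decide (2 ≤ (winners_of l).count 0) || decide (2 ≤ (winners_of l).count 1)) := by
  induction l with
  | nil => simp [pair_search_B, winners_of]
  | cons s rest ih =>
    by_cases hv : is_there_a_set_winner_B s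
    · simp only [pair_search_B]
      rw [if_neg (by simp [hv])]
      have hwin : winners_of (s :: rest) = get_winner_B s :: winners_of rest := by
        unfold winners_of
        rw [List.filter_cons_of_pos hv, List.map_cons]
      rw [hwin, any_eq_count rest (get_winner_B s)]
      have hcase : get_winner_B s = 0 ∨ get_winner_B s = 1 := by
        unfold get_winner_B; split_ifs <;> simp
      rcases hcase with h | h
      · rw [h, List.count_cons_self, List.count_cons_of_ne (by norm_num : (0:Int) ≠ 1), ih]
        split_ifs with hany
        · rw [decide_eq_true_iff] at hany
          symm
          simp only [Bool.or_eq_true, decide_eq_true_iff]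
          left; omega
        · rw [decide_eq_true_iff] at hany
          congr 1
          all_goals rw [decide_eq_decide]; omega
      · rw [h, List.count_cons_self, List.count_cons_of_ne (by norm_num : (1:Int) ≠ 0), ih]
        split_ifs with hany
        · rw [decide_eq_true_iff] at hany
          symm
          simp only [Bool.or_eq_true, decide_eq_true_iff]
          right; omega
        · rw [decide_eq_true_iff] at hany
          congr 1
          all_goals rw [decide_eq_decide]; omega
    · simp only [pair_search_B]
      rw [if_pos (by simp [hv])]
      have : winners_of (s :: rest) = winners_of rest := by
        unfold winners_of
        rw [List.filter_cons_of_neg hv]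
      rw [this, ih]

-- ===== VERDICT (by name: the statement is the Claim_ definition above) =====
theorem is_there_a_match_winner_spec : Claim_equal_is_there_a_match_winner := by
  intro l _
  unfold Spec_is_there_a_match_winner is_there_a_match_winner is_there_a_match_winner_alt
  have hA := loop_A_eq l 0 0 (by omega) (by omega)
  push_cast at hA
  rw [hA, pair_search_eq]
  simp
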